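-- pv_equiv track=rewrite | github.com/tlim8772/Leetcode | leetcode/lc3714.py | helper2
-- ===== SOURCE A (Python) =====
-- from functools import reduce
-- from collections import defaultdict
--
-- def helper2(s: str, c1: str, c2: str) -> int:
--     diff = 0
--     store: defaultdict[int, list[int]] = defaultdict(list)
--     store[0].append(-1)
--
--     for i in range(len(s)):
--         diff = diff + 1 if s[i] == c1 else diff - 1
--         store[diff].append(i)
--
--     return reduce(lambda acc, x: max(acc, x[-1] - x[0]), store.values(), 0)
-- ===== SOURCE B (Python) =====
-- def helper2(s: str, c1: str, c2: str) -> int: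
--     # Sort-and-group algorithm: build the (prefix-diff, index) pairs (seeded with (0, -1)),
--     # sort them by diff value, then scan the sorted list once, keeping the min/max index of
--     # the current equal-diff run; the answer is the largest (max - min) over the runs.
--     vals = [(0, -1)]
--     d = 0
--     for i, ch in enumerate(s):
--         d = d + 1 if ch == c1 else d - 1
--         vals.append((d, i))
--     vals.sort(key=lambda p: p[0])
--     ans = 0
--     cur = None  # (value, min_index, max_index) of the current run
--     for v, i in vals:
--         if cur is not None and cur[0] == v:
--             cur = (cur[0], min(cur[1], i), max(cur[2], i))
--         else:
--             if cur is not None: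
--                 ans = max(ans, cur[2] - cur[1])
--             cur = (v, i, i)
--     if cur is not None:
--         ans = max(ans, cur[2] - cur[1])
--     return ans
-- ===== Notes on version B (the rewrite author's own statement) =====
-- stated objective: alternative
-- what changed: Replaces A's hash-grouping (defaultdict of full index lists per prefix-diff, then a reduce over the buckets) by a sort-based algorithm: collect (prefix-diff, index) pairs, sort them by diff, and scan the sorted list once, tracking the min/max index of each equal-diff run.
import Mathlib
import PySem

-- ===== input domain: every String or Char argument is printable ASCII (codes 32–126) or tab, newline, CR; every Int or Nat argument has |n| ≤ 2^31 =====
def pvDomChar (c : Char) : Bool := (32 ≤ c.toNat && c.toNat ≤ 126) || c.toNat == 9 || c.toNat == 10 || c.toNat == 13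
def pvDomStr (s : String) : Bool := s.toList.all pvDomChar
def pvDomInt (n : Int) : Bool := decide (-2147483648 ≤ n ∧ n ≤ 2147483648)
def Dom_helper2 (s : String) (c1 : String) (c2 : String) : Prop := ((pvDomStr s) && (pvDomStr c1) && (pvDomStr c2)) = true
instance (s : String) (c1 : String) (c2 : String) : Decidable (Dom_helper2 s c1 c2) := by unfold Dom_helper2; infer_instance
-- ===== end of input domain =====

-- B replaces A's hash-grouping (dict of index lists per prefix-diff, reduced afterwards) by a
-- sort-based algorithm: sort the (prefix-diff, index) pairs by diff and scan the equal-diff runs.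

-- ===== PORT A =====
-- s[i] == c1 compares the one-character string s[i] with c1: modelled as c1.toList = [s[i]]
def helper2 (s : String) (c1 : String) (c2 : String) : Int :=
  let cs := s.toList
  let r := (PySem.List.pyRange 0 (PySem.List.len cs) 1).foldl
      (fun (st : Int × PySem.Dict Int (List Int)) (i : Int) =>
        let diff := if c1.toList = [PySem.List.pyGetD cs i ' '] then st.1 + 1 else st.1 - 1
        (diff, st.2.modify diff [] (· ++ [i])))
      (0, PySem.Dict.empty.modify 0 [] (· ++ [-1]))
  -- x[-1] / x[0]: every bucket is nonempty, so pyGetD with default 0 is exact here (IndexError unreachable)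
  r.2.values.foldl (fun acc x => max acc (PySem.List.pyGetD x (-1) 0 - PySem.List.pyGetD x 0 0)) 0

-- ===== PORT B =====
def helper2_alt (s : String) (c1 : String) (c2 : String) : Int :=
  let r := (PySem.List.enumerate s.toList 0).foldl
      (fun (st : Int × List (Int × Int)) (p : Int × Char) =>
        let d := if c1.toList = [p.2] then st.1 + 1 else st.1 - 1
        (d, st.2 ++ [(d, p.1)]))
      (0, [((0 : Int), (-1 : Int))])
  let vals := PySem.List.sorted r.2 (fun p => p.1) false
  let fin := vals.foldl
      (fun (st : Option (Int × Int × Int) × Int) (q : Int × Int) =>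
        match st.1 with
        | some c => if c.1 == q.1 then (some (c.1, min c.2.1 q.2, max c.2.2 q.2), st.2)
                    else (some (q.1, q.2, q.2), max st.2 (c.2.2 - c.2.1))
        | none => (some (q.1, q.2, q.2), st.2))
      (none, 0)
  match fin.1 with
  | some c => max fin.2 (c.2.2 - c.2.1)
  | none => fin.2

-- ===== PRECONDITION & SPEC =====
def Spec_helper2 (s : String) (c1 : String) (c2 : String) (out : Int) : Prop := out = helper2_alt s c1 c2
instance (s : String) (c1 : String) (c2 : String) (out : Int) : Decidable (Spec_helper2 s c1 c2 out) := by unfold Spec_helper2; infer_instance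

-- ===== CLAIM (what is proved, stated in full; the proofs are below) =====
def Claim_equal_helper2 : Prop := ∀ (s : String) (c1 : String) (c2 : String), Dom_helper2 s c1 c2 → Spec_helper2 s c1 c2 (helper2 s c1 c2)

-- ===== LEMMAS AND PROOFS =====

-- the loop bodies, named for the proofs
def pvStepA (c1 : String) (st : Int × PySem.Dict Int (List Int)) (p : Int × Char) :
    Int × PySem.Dict Int (List Int) :=
  let diff := if c1.toList = [p.2] then st.1 + 1 else st.1 - 1
  (diff, st.2.modify diff [] (· ++ [p.1]))

def pvStepB (c1 : String) (st : Int × List (Int × Int)) (p : Int × Char) :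
    Int × List (Int × Int) :=
  let d := if c1.toList = [p.2] then st.1 + 1 else st.1 - 1
  (d, st.2 ++ [(d, p.1)])

def pvScanStep (st : Option (Int × Int × Int) × Int) (q : Int × Int) :
    Option (Int × Int × Int) × Int :=
  match st.1 with
  | some c => if c.1 == q.1 then (some (c.1, min c.2.1 q.2, max c.2.2 q.2), st.2)
              else (some (q.1, q.2, q.2), max st.2 (c.2.2 - c.2.1))
  | none => (some (q.1, q.2, q.2), st.2)

def pvFlush (st : Option (Int × Int × Int) × Int) : Int :=
  match st.1 with
  | some c => max st.2 (c.2.2 - c.2.1)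
  | none => st.2

def pvDictStep (d : PySem.Dict Int (List Int)) (q : Int × Int) : PySem.Dict Int (List Int) :=
  d.modify q.1 [] (fun x => x ++ [q.2])

-- the (prefix-diff, index) pair list both loops traverse
def pvPairs (c1 : String) : List Char → Int → Int → List (Int × Int)
  | [], _, _ => []
  | c :: cs, n, diff =>
      let d' := if c1.toList = [c] then diff + 1 else diff - 1
      (d', n) :: pvPairs c1 cs (n + 1) d'

def pvAll (s : String) (c1 : String) : List (Int × Int) :=
  ((0 : Int), (-1 : Int)) :: pvPairs c1 s.toList 0 0

-- indices carrying diff value u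
def pvI (xs : List (Int × Int)) (u : Int) : List Int :=
  (xs.filter (fun p => p.1 == u)).map (fun x => x.2)

def pvHi : List Int → Int
  | [] => 0
  | h :: t => t.foldl max h

def pvLo : List Int → Int
  | [] => 0
  | h :: t => t.foldl min h

def pvSpread (l : List Int) : Int := pvHi l - pvLo l

-- ---- basic foldl max/min facts ----
theorem pv_foldl_min_le (t : List Int) (a : Int) :
    t.foldl min a ≤ a ∧ ∀ y ∈ t, t.foldl min a ≤ y := by
  induction t generalizing a with
  | nil => exact ⟨le_refl _, by intro y hy; cases hy⟩
  | cons x xs ih =>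
      simp only [List.foldl_cons]
      refine ⟨le_trans (ih (min a x)).1 (min_le_left _ _), ?_⟩
      intro y hy
      rcases List.mem_cons.mp hy with h | h
      · subst h; exact le_trans (ih (min a y)).1 (min_le_right _ _)
      · exact (ih (min a x)).2 y h

theorem pv_foldl_max_mem (t : List Int) (a : Int) : t.foldl max a ∈ a :: t := by
  induction t generalizing a with
  | nil => simp
  | cons x xs ih =>
      simp only [List.foldl_cons]
      rcases List.mem_cons.mp (ih (max a x)) with h | h
      · rcases max_choice a x with hm | hm
        · exact List.mem_cons.mpr (Or.inl (h.trans hm))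
        · exact List.mem_cons.mpr (Or.inr (List.mem_cons.mpr (Or.inl (h.trans hm))))
      · exact List.mem_cons.mpr (Or.inr (List.mem_cons.mpr (Or.inr h)))

theorem pv_foldl_min_mem (t : List Int) (a : Int) : t.foldl min a ∈ a :: t := by
  induction t generalizing a with
  | nil => simp
  | cons x xs ih =>
      simp only [List.foldl_cons]
      rcases List.mem_cons.mp (ih (min a x)) with h | h
      · rcases min_choice a x with hm | hm
        · exact List.mem_cons.mpr (Or.inl (h.trans hm))
        · exact List.mem_cons.mpr (Or.inr (List.mem_cons.mpr (Or.inl (h.trans hm))))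
      · exact List.mem_cons.mpr (Or.inr (List.mem_cons.mpr (Or.inr h)))

theorem pv_hiOf_spec (h : Int) (t : List Int) :
    pvHi (h :: t) ∈ h :: t ∧ ∀ x ∈ h :: t, x ≤ pvHi (h :: t) := by
  refine ⟨pv_foldl_max_mem t h, ?_⟩
  intro x hx
  rcases List.mem_cons.mp hx with hh | hh
  · subst hh; exact (PySem.List.le_foldl_max t x).1
  · exact (PySem.List.le_foldl_max t h).2 x hh

theorem pv_loOf_spec (h : Int) (t : List Int) :
    pvLo (h :: t) ∈ h :: t ∧ ∀ x ∈ h :: t, pvLo (h :: t) ≤ x := by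
  refine ⟨pv_foldl_min_mem t h, ?_⟩
  intro x hx
  rcases List.mem_cons.mp hx with hh | hh
  · subst hh; exact (pv_foldl_min_le t x).1
  · exact (pv_foldl_min_le t h).2 x hh

theorem pv_spread_perm (l1 l2 : List Int) (hp : l1.Perm l2) (hne : l1 ≠ []) :
    pvSpread l1 = pvSpread l2 := by
  rcases l1 with _ | ⟨h1, t1⟩
  · exact absurd rfl hne
  rcases l2 with _ | ⟨h2, t2⟩
  · exact absurd hp.symm (by simp)
  obtain ⟨m1, b1⟩ := pv_hiOf_spec h1 t1
  obtain ⟨m2, b2⟩ := pv_hiOf_spec h2 t2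
  obtain ⟨n1, c1⟩ := pv_loOf_spec h1 t1
  obtain ⟨n2, c2⟩ := pv_loOf_spec h2 t2
  have hhi : pvHi (h1 :: t1) = pvHi (h2 :: t2) :=
    le_antisymm (b2 _ (hp.mem_iff.mp m1)) (b1 _ (hp.mem_iff.mpr m2))
  have hlo : pvLo (h1 :: t1) = pvLo (h2 :: t2) :=
    le_antisymm (c1 _ (hp.mem_iff.mpr n2)) (c2 _ (hp.mem_iff.mp n1))
  unfold pvSpread
  omega

-- spread only depends on the multiset; two-seed reshaping lemmas used by the scan proof
theorem pv_spread_cons3_eq (r : List Int) (a b c x y : Int)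
    (hmax : max (max a b) c = max x y) (hmin : min (min a b) c = min x y) :
    pvSpread (a :: b :: c :: r) = pvSpread (x :: y :: r) := by
  unfold pvSpread pvHi pvLo
  simp only [List.foldl_cons, hmax, hmin]

theorem pv_spread_dup (j : Int) (r : List Int) : pvSpread (j :: j :: r) = pvSpread (j :: r) := by
  unfold pvSpread pvHi pvLo
  simp only [List.foldl_cons, max_self, min_self]

theorem pv_foldl_max_shift (f : Int → Int) (xs : List Int) (a b : Int) :
    xs.foldl (fun acc x => max acc (f x)) (max a b) = max (xs.foldl (fun acc x => max acc (f x)) a) b := by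
  induction xs generalizing a with
  | nil => rfl
  | cons x xs ih =>
      simp only [List.foldl_cons]
      rw [max_right_comm, ih]

theorem pv_le_foldl_maxf (g : Int → Int) (K : List Int) (a : Int) :
    a ≤ K.foldl (fun x u => max x (g u)) a := by
  induction K generalizing a with
  | nil => exact le_refl _
  | cons k ks ih =>
      simp only [List.foldl_cons]
      exact le_trans (le_max_left _ _) (ih (max a (g k)))

-- ---- the pair list ----
theorem pvB_build (c1 : String) (cs : List Char) (n diff : Int) (acc : List (Int × Int)) :
    ((PySem.List.enumerate cs n).foldl (pvStepB c1) (diff, acc)).2 = acc ++ pvPairs c1 cs n diff := by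
  induction cs generalizing n diff acc with
  | nil => simp [PySem.List.enumerate_nil, pvPairs]
  | cons c cs ih =>
      rw [PySem.List.enumerate_cons]
      simp only [List.foldl_cons, pvStepB, pvPairs]
      rw [ih]
      simp

theorem pvA_build (c1 : String) (cs : List Char) (n diff : Int) (d : PySem.Dict Int (List Int)) :
    ((PySem.List.enumerate cs n).foldl (pvStepA c1) (diff, d)).2
      = (pvPairs c1 cs n diff).foldl pvDictStep d := by
  induction cs generalizing n diff d with
  | nil => simp [PySem.List.enumerate_nil, pvPairs]
  | cons c cs ih =>
      rw [PySem.List.enumerate_cons]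
      simp only [List.foldl_cons, pvStepA, pvPairs, pvDictStep]
      exact ih _ _ _

theorem pvPairs_snd_ge (c1 : String) (cs : List Char) (n diff : Int) :
    ∀ p ∈ pvPairs c1 cs n diff, n ≤ p.2 := by
  induction cs generalizing n diff with
  | nil => intro p hp; cases hp
  | cons c cs ih =>
      intro p hp
      simp only [pvPairs, List.mem_cons] at hp
      rcases hp with h | h
      · subst h; exact le_refl _
      · have := ih (n + 1) _ p h; omega

theorem pvPairs_pairwise (c1 : String) (cs : List Char) (n diff : Int) :
    (pvPairs c1 cs n diff).Pairwise (fun a b => a.2 < b.2) := by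
  induction cs generalizing n diff with
  | nil => exact List.Pairwise.nil
  | cons c cs ih =>
      simp only [pvPairs]
      refine List.Pairwise.cons ?_ (ih _ _)
      intro p hp
      have := pvPairs_snd_ge c1 cs (n + 1) _ p hp
      omega

theorem pvAll_pairwise (s : String) (c1 : String) :
    (pvAll s c1).Pairwise (fun a b => a.2 < b.2) := by
  unfold pvAll
  refine List.Pairwise.cons ?_ (pvPairs_pairwise c1 s.toList 0 0)
  intro p hp
  have := pvPairs_snd_ge c1 s.toList 0 0 p hp
  omega

theorem pvI_ne_nil (xs : List (Int × Int)) (u : Int) (h : u ∈ xs.map (fun p => p.1)) :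
    pvI xs u ≠ [] := by
  obtain ⟨p, hp, hu⟩ := List.mem_map.mp h
  unfold pvI
  simp only [ne_eq, List.map_eq_nil_iff, List.filter_eq_nil_iff, not_forall]
  exact ⟨p, hp, by simp [hu]⟩

theorem pvI_pairwise (xs : List (Int × Int)) (u : Int)
    (h : xs.Pairwise (fun a b => a.2 < b.2)) : (pvI xs u).Pairwise (· < ·) := by
  unfold pvI
  rw [List.pairwise_map]
  exact h.filter _

-- spread of a strictly increasing nonempty list is last - first
theorem pv_foldl_min_const (t : List Int) (a : Int) (h : ∀ y ∈ t, a ≤ y) :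
    t.foldl min a = a := by
  induction t generalizing a with
  | nil => rfl
  | cons x xs ih =>
      simp only [List.foldl_cons]
      rw [min_eq_left (h x List.mem_cons_self)]
      exact ih a (fun y hy => h y (List.mem_cons_of_mem _ hy))

theorem pv_hiOf_sorted (h : Int) (t : List Int) (hp : (h :: t).Pairwise (· < ·)) :
    pvHi (h :: t) = (h :: t).getLast (List.cons_ne_nil _ _) := by
  induction t generalizing h with
  | nil => rfl
  | cons c t' ih =>
      have hph := List.pairwise_cons.mp hp
      have : pvHi (h :: c :: t') = pvHi (c :: t') := by
        unfold pvHi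
        simp only [List.foldl_cons]
        rw [max_eq_right (le_of_lt (hph.1 c List.mem_cons_self))]
      rw [this, ih c hph.2]
      rfl

theorem pv_spread_sorted (l : List Int) (hne : l ≠ []) (hp : l.Pairwise (· < ·)) :
    PySem.List.pyGetD l (-1) 0 - PySem.List.pyGetD l 0 0 = pvSpread l := by
  rcases l with _ | ⟨h, t⟩
  · exact absurd rfl hne
  rw [PySem.List.pyGetD_neg_one _ _ (List.cons_ne_nil _ _), PySem.List.pyGetD_zero_cons]
  have hlo : pvLo (h :: t) = h := by
    unfold pvLo
    exact pv_foldl_min_const t h (fun y hy => le_of_lt ((List.pairwise_cons.mp hp).1 y hy))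
  unfold pvSpread
  rw [pv_hiOf_sorted h t hp, hlo]

-- ---- the scan lemma: scanning a key-sorted list computes the per-value spreads ----
theorem pvScan (ys : List (Int × Int)) (v lo hi ans : Int)
    (hsorted : ys.Pairwise (fun a b => a.1 ≤ b.1)) (hge : ∀ p ∈ ys, v ≤ p.1) (hlh : lo ≤ hi) :
    ∃ K : List Int, K.Nodup ∧ (∀ u, u ∈ K ↔ u = v ∨ u ∈ ys.map (fun p => p.1)) ∧
      pvFlush (ys.foldl pvScanStep (some (v, lo, hi), ans)) =
        max ans (K.foldl (fun a u => max a (pvSpread (pvI ((v, lo) :: (v, hi) :: ys) u))) 0) := by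
  induction ys generalizing v lo hi ans with
  | nil =>
      refine ⟨[v], List.nodup_singleton _, by simp, ?_⟩
      have hI : pvI [(v, lo), (v, hi)] v = [lo, hi] := by simp [pvI]
      have hs : pvSpread [lo, hi] = hi - lo := by
        unfold pvSpread pvHi pvLo
        simp only [List.foldl_cons, List.foldl_nil]
        rw [max_eq_right hlh, min_eq_left hlh]
      simp only [List.foldl_nil, List.foldl_cons, hI, hs]
      rw [max_eq_right (by omega : (0:Int) ≤ hi - lo)]
      rfl
  | cons q t ih =>
      obtain ⟨w, j⟩ := q
      rw [List.pairwise_cons] at hsorted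
      obtain ⟨hwt, hpt⟩ := hsorted
      have hvw : v ≤ w := hge (w, j) List.mem_cons_self
      have hstep : pvScanStep (some (v, lo, hi), ans) (w, j)
          = if v = w then (some (v, min lo j, max hi j), ans)
            else (some (w, j, j), max ans (hi - lo)) := by
        simp [pvScanStep, beq_iff_eq]
      by_cases hvw2 : v = w
      · subst hvw2
        rw [List.foldl_cons, hstep, if_pos rfl]
        obtain ⟨K, hnd, hmem, heq⟩ := ih v (min lo j) (max hi j) ans hpt
          (fun p hp => hge p (List.mem_cons_of_mem _ hp)) (by
            have h1 : min lo j ≤ lo := min_le_left _ _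
            have h2 : hi ≤ max hi j := le_max_left _ _
            omega)
        refine ⟨K, hnd, ?_, ?_⟩
        · intro u
          rw [hmem u]
          simp only [List.map_cons, List.mem_cons]
          tauto
        · rw [heq]
          congr 1
          apply PySem.List.foldl_congr_mem
          intro acc u hu
          congr 1
          by_cases huv : u = v
          · subst huv
            have h1 : pvI ((u, min lo j) :: (u, max hi j) :: t) u
                = min lo j :: max hi j :: pvI t u := by simp [pvI]
            have h2 : pvI ((u, lo) :: (u, hi) :: (u, j) :: t) u
                = lo :: hi :: j :: pvI t u := by simp [pvI]
            rw [h1, h2]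
            exact (pv_spread_cons3_eq (pvI t u) lo hi j (min lo j) (max hi j)
              (by simp only [max_def, min_def]; split_ifs <;> omega)
              (by simp only [max_def, min_def]; split_ifs <;> omega)).symm
          · have h1 : pvI ((v, min lo j) :: (v, max hi j) :: t) u = pvI t u := by
              simp [pvI, Ne.symm huv]
            have h2 : pvI ((v, lo) :: (v, hi) :: (v, j) :: t) u = pvI t u := by
              simp [pvI, Ne.symm huv]
            rw [h1, h2]
      · have hvlt : v < w := lt_of_le_of_ne hvw hvw2
        rw [List.foldl_cons, hstep, if_neg hvw2]
        obtain ⟨K, hnd, hmem, heq⟩ := ih w j j (max ans (hi - lo)) hpt hwt (le_refl j)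
        have hKv : v ∉ K := by
          intro hvK
          rcases (hmem v).mp hvK with h | h
          · exact hvw2 h
          · obtain ⟨p, hp, hpv⟩ := List.mem_map.mp h
            have := hwt p hp
            omega
        refine ⟨v :: K, List.nodup_cons.mpr ⟨hKv, hnd⟩, ?_, ?_⟩
        · intro u
          simp only [List.mem_cons, hmem u, List.map_cons]
        · rw [heq]
          have htv : ∀ p ∈ t, (p.1 == v) = false := by
            intro p hp
            have := hwt p hp
            simp only [beq_eq_false_iff_ne, ne_eq]
            omega
          have ht : t.filter (fun p => p.1 == v) = [] :=
            List.filter_eq_nil_iff.mpr (fun p hp => by rw [htv p hp]; simp)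
          have hIv : pvI ((v, lo) :: (v, hi) :: (w, j) :: t) v = [lo, hi] := by
            unfold pvI
            rw [List.filter_cons_of_pos (by simp), List.filter_cons_of_pos (by simp),
              List.filter_cons_of_neg (by simp [Ne.symm hvw2]), ht]
            rfl
          have hseq : pvSpread (pvI ((v, lo) :: (v, hi) :: (w, j) :: t) v) = hi - lo := by
            rw [hIv]
            unfold pvSpread pvHi pvLo
            simp only [List.foldl_cons, List.foldl_nil]
            rw [max_eq_right hlh, min_eq_left hlh]
          have hcongr : K.foldl (fun a u => max a (pvSpread (pvI ((w, j) :: (w, j) :: t) u))) 0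
              = K.foldl (fun a u => max a (pvSpread (pvI ((v, lo) :: (v, hi) :: (w, j) :: t) u))) 0 := by
            apply PySem.List.foldl_congr_mem
            intro acc u hu
            have hune : u ≠ v := fun h => hKv (h ▸ hu)
            have hL : pvI ((v, lo) :: (v, hi) :: (w, j) :: t) u = pvI ((w, j) :: t) u := by
              unfold pvI
              rw [List.filter_cons_of_neg (by simp [Ne.symm hune]),
                List.filter_cons_of_neg (by simp [Ne.symm hune])]
            congr 1
            rw [hL]
            by_cases huw : u = w
            · subst huw
              have h1 : pvI ((u, j) :: (u, j) :: t) u = j :: j :: pvI t u := by simp [pvI]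
              have h2 : pvI ((u, j) :: t) u = j :: pvI t u := by simp [pvI]
              rw [h1, h2, pv_spread_dup]
            · have h1 : pvI ((w, j) :: (w, j) :: t) u = pvI t u := by simp [pvI, Ne.symm huw]
              have h2 : pvI ((w, j) :: t) u = pvI t u := by simp [pvI, Ne.symm huw]
              rw [h1, h2]
          simp only [List.foldl_cons]
          rw [hseq]
          rw [pv_foldl_max_shift (fun u => pvSpread (pvI ((v, lo) :: (v, hi) :: (w, j) :: t) u)) K 0 (hi - lo)]
          rw [← hcongr, max_assoc, max_comm (hi - lo)]

-- ===== VERDICT (by name: the statement is the Claim_ definition above) =====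
theorem pv_d0_keys :
    (PySem.Dict.empty.modify 0 [] (· ++ [-1]) : PySem.Dict Int (List Int)).keys = [0] := by decide

theorem helper2_spec : Claim_equal_helper2 := by
  unfold Claim_equal_helper2
  intro s c1 c2 _
  unfold Spec_helper2
  have hA0 : helper2 s c1 c2
      = (((PySem.List.enumerate s.toList 0).foldl (pvStepA c1)
          (0, PySem.Dict.empty.modify 0 [] (· ++ [-1]))).2).values.foldl
          (fun acc x => max acc (PySem.List.pyGetD x (-1) 0 - PySem.List.pyGetD x 0 0)) 0 := by
    unfold helper2
    rw [PySem.List.enumerate_eq_map_pyRange s.toList ' ', List.foldl_map]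
    rfl
  set d0 : PySem.Dict Int (List Int) := PySem.Dict.empty.modify 0 [] (· ++ [-1]) with hd0
  set store : PySem.Dict Int (List Int) := (pvPairs c1 s.toList 0 0).foldl pvDictStep d0 with hstore
  have hA1 : helper2 s c1 c2 = store.values.foldl
      (fun acc x => max acc (PySem.List.pyGetD x (-1) 0 - PySem.List.pyGetD x 0 0)) 0 := by
    rw [hA0, pvA_build]
  have hd0keys : d0.keys = [0] := by rw [hd0]; exact pv_d0_keys
  have hkeys : store.keys
      = PySem.Set.update d0.keys ((pvPairs c1 s.toList 0 0).map (fun q => q.1)) := by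
    rw [hstore]
    exact PySem.Dict.keys_foldl_modify_key (pvPairs c1 s.toList 0 0) (fun q => q.1) []
      (fun _ q => fun x => x ++ [q.2]) d0
  have hnodup : store.keys.Nodup := by
    rw [hstore]
    exact PySem.Dict.nodup_keys_foldl_modify_key (pvPairs c1 s.toList 0 0) (fun q => q.1) []
      (fun _ q => fun x => x ++ [q.2]) d0 (by rw [hd0keys]; simp)
  have hmemkeys : ∀ u, u ∈ store.keys ↔ u ∈ (pvAll s c1).map (fun p => p.1) := by
    intro u
    rw [hkeys, hd0keys, PySem.Set.mem_update]
    simp [pvAll]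
  have hbucket : ∀ u, store.getD u [] = pvI (pvAll s c1) u := by
    intro u
    rw [hstore]
    rw [show ((pvPairs c1 s.toList 0 0).foldl pvDictStep d0)
        = ((pvPairs c1 s.toList 0 0).foldl (fun d p => d.modify p.1 [] fun x => x ++ [p.2]) d0)
        from rfl]
    rw [PySem.Dict.getD_foldl_modify_append (pvPairs c1 s.toList 0 0) d0 u]
    have hd0g : d0.getD u [] = if u = 0 then [-1] else [] := by
      rw [hd0, PySem.Dict.getD_modify]
      simp [PySem.Dict.getD_empty]
    rw [hd0g]
    unfold pvI pvAll
    by_cases hu : u = 0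
    · subst hu
      rw [List.filter_cons_of_pos (by simp)]
      simp
    · rw [List.filter_cons_of_neg (by simp [Ne.symm hu])]
      simp [hu]
  have hA2 : helper2 s c1 c2
      = store.keys.foldl (fun acc u => max acc (pvSpread (pvI (pvAll s c1) u))) 0 := by
    rw [hA1, PySem.Dict.values_eq_map_keys store hnodup [], List.foldl_map]
    apply PySem.List.foldl_congr_mem
    intro acc u hu
    rw [hbucket u]
    congr 1
    exact pv_spread_sorted _ (pvI_ne_nil _ _ ((hmemkeys u).mp hu))
      (pvI_pairwise _ _ (pvAll_pairwise s c1))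
  -- B side
  have hB0 : helper2_alt s c1 c2
      = pvFlush ((PySem.List.sorted (((PySem.List.enumerate s.toList 0).foldl (pvStepB c1)
          (0, [((0:Int), (-1:Int))])).2) (fun p => p.1) false).foldl pvScanStep (none, 0)) := rfl
  have hvalsEq : ((PySem.List.enumerate s.toList 0).foldl (pvStepB c1)
      (0, [((0:Int), (-1:Int))])).2 = pvAll s c1 := by
    rw [pvB_build]
    rfl
  rw [hvalsEq] at hB0
  set vals := PySem.List.sorted (pvAll s c1) (fun p => p.1) false with hvals
  have hvperm : vals.Perm (pvAll s c1) := PySem.List.sorted_perm _ _ _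
  have hvne : vals ≠ [] := by
    rw [hvals, Ne, PySem.List.sorted_eq_nil_iff]
    simp [pvAll]
  obtain ⟨q0, t0, hv⟩ : ∃ q t, vals = q :: t := by
    cases hvv : vals with
    | nil => exact absurd hvv hvne
    | cons a b => exact ⟨a, b, rfl⟩
  obtain ⟨v0, i0⟩ := q0
  have hpw : vals.Pairwise (fun a b => a.1 ≤ b.1) := by
    rw [hvals]
    exact PySem.List.sorted_pairwise _ _
  rw [hv, List.pairwise_cons] at hpw
  have hB1 : helper2_alt s c1 c2 = pvFlush (t0.foldl pvScanStep (some (v0, i0, i0), 0)) := by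
    rw [hB0, hv, List.foldl_cons]
    rfl
  obtain ⟨K, hKnd, hKmem, hKeq⟩ := pvScan t0 v0 i0 i0 0 hpw.2 hpw.1 (le_refl i0)
  rw [hKeq] at hB1
  have hfold0 : (0:Int) ≤ K.foldl (fun a u => max a (pvSpread (pvI ((v0,i0)::(v0,i0)::t0) u))) 0 :=
    pv_le_foldl_maxf _ K 0
  rw [max_eq_right hfold0] at hB1
  have hB3 : helper2_alt s c1 c2
      = K.foldl (fun a u => max a (pvSpread (pvI (pvAll s c1) u))) 0 := by
    rw [hB1]
    apply PySem.List.foldl_congr_mem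
    intro acc u hu
    congr 1
    have hmem_vals : u ∈ vals.map (fun p => p.1) := by
      rw [hv]
      rcases (hKmem u).mp hu with h | h
      · subst h; simp
      · simp [h]
    have hstep1 : pvSpread (pvI ((v0,i0)::(v0,i0)::t0) u) = pvSpread (pvI ((v0,i0)::t0) u) := by
      by_cases huv : u = v0
      · subst huv
        have h1 : pvI ((u,i0)::(u,i0)::t0) u = i0 :: i0 :: pvI t0 u := by simp [pvI]
        have h2 : pvI ((u,i0)::t0) u = i0 :: pvI t0 u := by simp [pvI]
        rw [h1, h2, pv_spread_dup]
      · have h1 : pvI ((v0,i0)::(v0,i0)::t0) u = pvI t0 u := by simp [pvI, Ne.symm huv]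
        have h2 : pvI ((v0,i0)::t0) u = pvI t0 u := by simp [pvI, Ne.symm huv]
        rw [h1, h2]
    rw [hstep1, ← hv]
    exact pv_spread_perm _ _ (by unfold pvI; exact ((hvperm.filter _).map _))
      (pvI_ne_nil _ _ hmem_vals)
  have hmapperm : (vals.map (fun p => p.1)).Perm ((pvAll s c1).map (fun p => p.1)) :=
    hvperm.map _
  have hKperm : K.Perm store.keys := by
    rw [List.perm_ext_iff_of_nodup hKnd hnodup]
    intro u
    rw [hKmem u, hmemkeys u, ← hmapperm.mem_iff, hv]
    simp
  have hfinal : K.foldl (fun a u => max a (pvSpread (pvI (pvAll s c1) u))) 0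
      = store.keys.foldl (fun a u => max a (pvSpread (pvI (pvAll s c1) u))) 0 :=
    List.Perm.foldl_eq (f := fun a u => max a (pvSpread (pvI (pvAll s c1) u)))
      (rcomm := ⟨fun b a a' => max_right_comm b _ _⟩) hKperm 0
  rw [hA2, hB3, hfinal]
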